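-- pv_equiv track=rewrite | github.com/mayadagan/ranking_app | app.py | build_pair_recs_alignment_plan
-- ===== SOURCE A (Python) =====
-- _RAW_REC_MAP = {
--     "rec1":  {"DL": "Labs - for risk stratification / screening: lipid panel (cost 2)", "category": "Labs", "main": "lipid panel", "cost": "(cost 2)"},
--     "rec2":  {"DL": "Labs - for treatment monitoring: liver enzymes (cost 1)", "category": "Labs", "main": "liver enzymes", "cost": "(cost 1)"},
--     "rec3":  {"DL": "Labs - for risk stratification / screening:  Lp(a) (cost 6)", "category": "Labs", "main": "Lp(a)", "cost": "(cost 6)"},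
--     "rec4":  {"DL": "Labs - for treatment monitoring: LDL (cost 2)",  "category": "Labs", "main": "LDL", "cost": "(cost 2)"},
--     "rec5":  {"DL": "Imaging - for risk stratification: carotid doppler (cost 20)",  "category": "Imaging", "main": "carotid doppler", "cost": "(cost 20)"},
--     "rec6":  {"DL": "Treatment - initiate first-line: low dose statin (yearly cost 200)", "category": "Treatment", "main": "low dose statin", "cost": "(yearly cost 200)"},
--     "rec7":  {"DL": "Treatment - initiate advanced treatment: high dose statin (yearly cost 200)", "category": "Treatment", "main": "high dose statin", "cost": "(yearly cost 200)"},
--     "rec8":  {"DL": "Treatment - prescribe advanced treatment: PCSK9 (yearly cost 20,000)", "category": "Treatment", "main": "PCSK9", "cost": "(yearly cost 20,000)"},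
--     "rec9":  {"DL": "Treatment - upgrade: high dose statin (yearly cost 200)", "category": "Treatment", "main": "high dose statin", "cost": "(yearly cost 200)"},
--     "rec10": {"DL": "Treatment - replacement d/t contraindication: switch to PCSK9 (yearly cost 20,000)",  "category": "Treatment", "main": "PCSK9", "cost": "(yearly cost 20,000)"},
--     "rec11": {"DL": "Consults - lipidologist consult: d/t statins failure/intolerance, to consider PCSK9 (cost 6)", "category": "Consults", "main": "lipidologist", "cost": "(cost 6)"},
--     "rec12": {"DL": "Consults - hepatology consult: d/t high liver enzymes after statin initiation (cost 5)", "category": "Consults", "main": "hepatology", "cost": "(cost 5)"},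
--     "rec13": {"DL": "Lifestyle - dietitian: package of nutritional consultation sessions (cost 20)",  "category": "Lifestyle", "main": "nutritional consultation", "cost": "(cost 20)"},
--     "rec14": {"DL": "Treatment - discuss pros/cons of drugs vs. lifestyle changes in gray-zone patients (cost 2)",  "category": "Treatment", "main": "discuss pros/cons", "cost": "(cost 2)"},
--     "rec15": {"DL": "Lifestyle - consult about exercise, nutrition, and smoking (cost 2)",  "category": "Lifestyle", "main": "exercise, nutrition, and smoking", "cost": "(cost 2)"},
--     "rec16": {"DL": 'Lifestyle - reccomend the AHA "Heart & Stroke Helper" app to track lipids, meds and lifestyle (cost 0)',  "category": "Lifestyle", "main": '"Heart & Stroke Helper" app', "cost": "(cost 0)"}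
-- }
--
-- _CATEGORY_ORDER = ["Labs", "Imaging", "Treatment", "Consults", "Lifestyle", "Other"]
--
-- def recs_by_category_for_patient(p: dict) -> dict[str, list[str]]:
--     chosen = set(p.get("recommendations") or [])
--     out: dict[str, list[str]] = {}
--     for _, meta in _RAW_REC_MAP.items():
--         dl = meta["DL"]
--         if dl in chosen:
--             out.setdefault(meta["category"], []).append(dl)
--     return out
--
-- def build_pair_recs_alignment_plan(pX: dict, pY: dict):
--     by_x = recs_by_category_for_patient(pX)
--     by_y = recs_by_category_for_patient(pY)
--
--     cats_x, cats_y = set(by_x.keys()), set(by_y.keys())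
--     common = [c for c in _CATEGORY_ORDER if c in cats_x and c in cats_y]
--     rest   = [c for c in _CATEGORY_ORDER if c not in common and (c in cats_x or c in cats_y)]
--     category_order = common + rest
--
--     # per-category master list: common DLs first (map order), then X-only, then Y-only
--     per_cat: dict[str, list[str]] = {}
--     for cat in category_order:
--         xs = by_x.get(cat, [])
--         ys = by_y.get(cat, [])
--         commons = [dl for dl in xs if dl in ys]
--         x_only  = [dl for dl in xs if dl not in commons]
--         y_only  = [dl for dl in ys if dl not in commons]
--         per_cat[cat] = commons + x_only + y_only
--     return category_order, per_cat
-- ===== SOURCE B (Python) =====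
-- _RAW_REC_MAP = {
--     "rec1":  {"DL": "Labs - for risk stratification / screening: lipid panel (cost 2)", "category": "Labs", "main": "lipid panel", "cost": "(cost 2)"},
--     "rec2":  {"DL": "Labs - for treatment monitoring: liver enzymes (cost 1)", "category": "Labs", "main": "liver enzymes", "cost": "(cost 1)"},
--     "rec3":  {"DL": "Labs - for risk stratification / screening:  Lp(a) (cost 6)", "category": "Labs", "main": "Lp(a)", "cost": "(cost 6)"},
--     "rec4":  {"DL": "Labs - for treatment monitoring: LDL (cost 2)",  "category": "Labs", "main": "LDL", "cost": "(cost 2)"},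
--     "rec5":  {"DL": "Imaging - for risk stratification: carotid doppler (cost 20)",  "category": "Imaging", "main": "carotid doppler", "cost": "(cost 20)"},
--     "rec6":  {"DL": "Treatment - initiate first-line: low dose statin (yearly cost 200)", "category": "Treatment", "main": "low dose statin", "cost": "(yearly cost 200)"},
--     "rec7":  {"DL": "Treatment - initiate advanced treatment: high dose statin (yearly cost 200)", "category": "Treatment", "main": "high dose statin", "cost": "(yearly cost 200)"},
--     "rec8":  {"DL": "Treatment - prescribe advanced treatment: PCSK9 (yearly cost 20,000)", "category": "Treatment", "main": "PCSK9", "cost": "(yearly cost 20,000)"},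
--     "rec9":  {"DL": "Treatment - upgrade: high dose statin (yearly cost 200)", "category": "Treatment", "main": "high dose statin", "cost": "(yearly cost 200)"},
--     "rec10": {"DL": "Treatment - replacement d/t contraindication: switch to PCSK9 (yearly cost 20,000)",  "category": "Treatment", "main": "PCSK9", "cost": "(yearly cost 20,000)"},
--     "rec11": {"DL": "Consults - lipidologist consult: d/t statins failure/intolerance, to consider PCSK9 (cost 6)", "category": "Consults", "main": "lipidologist", "cost": "(cost 6)"},
--     "rec12": {"DL": "Consults - hepatology consult: d/t high liver enzymes after statin initiation (cost 5)", "category": "Consults", "main": "hepatology", "cost": "(cost 5)"},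
--     "rec13": {"DL": "Lifestyle - dietitian: package of nutritional consultation sessions (cost 20)",  "category": "Lifestyle", "main": "nutritional consultation", "cost": "(cost 20)"},
--     "rec14": {"DL": "Treatment - discuss pros/cons of drugs vs. lifestyle changes in gray-zone patients (cost 2)",  "category": "Treatment", "main": "discuss pros/cons", "cost": "(cost 2)"},
--     "rec15": {"DL": "Lifestyle - consult about exercise, nutrition, and smoking (cost 2)",  "category": "Lifestyle", "main": "exercise, nutrition, and smoking", "cost": "(cost 2)"},
--     "rec16": {"DL": 'Lifestyle - reccomend the AHA "Heart & Stroke Helper" app to track lipids, meds and lifestyle (cost 0)',  "category": "Lifestyle", "main": '"Heart & Stroke Helper" app', "cost": "(cost 0)"}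
-- }
--
-- _CATEGORY_ORDER = ["Labs", "Imaging", "Treatment", "Consults", "Lifestyle", "Other"]
--
-- def build_pair_recs_alignment_plan(pX: dict, pY: dict):
--     # One pass over the rec map: bucket each chosen DL as common / X-only / Y-only
--     # per category, recording which categories each patient touches.
--     chosen_x = set(pX.get("recommendations") or [])
--     chosen_y = set(pY.get("recommendations") or [])
--     common_d: dict[str, list[str]] = {}
--     x_d: dict[str, list[str]] = {}
--     y_d: dict[str, list[str]] = {}
--     has_x: set[str] = set()
--     has_y: set[str] = set()
--     for meta in _RAW_REC_MAP.values():
--         dl, cat = meta["DL"], meta["category"]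
--         in_x, in_y = dl in chosen_x, dl in chosen_y
--         if in_x:
--             has_x.add(cat)
--             if in_y:
--                 common_d.setdefault(cat, []).append(dl)
--             else:
--                 x_d.setdefault(cat, []).append(dl)
--         elif in_y:
--             y_d.setdefault(cat, []).append(dl)
--         if in_y:
--             has_y.add(cat)
--     category_order = [c for c in _CATEGORY_ORDER if c in has_x and c in has_y] + \
--                      [c for c in _CATEGORY_ORDER if (c in has_x) != (c in has_y)]
--     per_cat = {c: common_d.get(c, []) + x_d.get(c, []) + y_d.get(c, []) for c in category_order}
--     return category_order, per_cat
-- ===== Notes on version B (the rewrite author's own statement) =====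
-- stated objective: alternative
-- what changed: Replaces the per-patient grouping helper plus per-category triple rescans (commons/x_only/y_only recomputed by list membership for each category) with a single pass over _RAW_REC_MAP that buckets each DL directly into per-category common/X-only/Y-only dicts and presence sets, from which the category order and per-category lists are read off.
import Mathlib
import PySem

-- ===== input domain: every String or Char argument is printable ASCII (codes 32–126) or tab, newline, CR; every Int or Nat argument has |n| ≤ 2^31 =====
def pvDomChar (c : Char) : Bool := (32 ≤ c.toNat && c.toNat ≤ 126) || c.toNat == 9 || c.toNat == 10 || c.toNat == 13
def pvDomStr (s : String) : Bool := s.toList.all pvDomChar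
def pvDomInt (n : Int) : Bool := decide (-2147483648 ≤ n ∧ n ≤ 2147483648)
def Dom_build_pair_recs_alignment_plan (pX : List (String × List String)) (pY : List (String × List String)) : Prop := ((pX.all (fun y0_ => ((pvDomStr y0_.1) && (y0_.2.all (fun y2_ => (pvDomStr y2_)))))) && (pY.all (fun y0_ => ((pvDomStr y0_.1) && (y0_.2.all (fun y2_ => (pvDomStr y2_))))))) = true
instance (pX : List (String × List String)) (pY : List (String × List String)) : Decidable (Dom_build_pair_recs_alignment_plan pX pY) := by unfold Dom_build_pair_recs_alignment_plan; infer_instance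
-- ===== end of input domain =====

-- B replaces A's per-patient grouping helper plus per-category membership rescans by ONE pass
-- over the rec map that buckets each DL into common/X-only/Y-only per-category dicts and
-- category presence sets (objective: alternative decomposition, same exact output).

-- ===== PORT A =====

-- the module constants _RAW_REC_MAP and _CATEGORY_ORDER
def pvRawRecMap : PySem.Dict String (PySem.Dict String String) := PySem.Dict.mk [
  ("rec1",  PySem.Dict.mk [("DL", "Labs - for risk stratification / screening: lipid panel (cost 2)"), ("category", "Labs"), ("main", "lipid panel"), ("cost", "(cost 2)")]),
  ("rec2",  PySem.Dict.mk [("DL", "Labs - for treatment monitoring: liver enzymes (cost 1)"), ("category", "Labs"), ("main", "liver enzymes"), ("cost", "(cost 1)")]),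
  ("rec3",  PySem.Dict.mk [("DL", "Labs - for risk stratification / screening:  Lp(a) (cost 6)"), ("category", "Labs"), ("main", "Lp(a)"), ("cost", "(cost 6)")]),
  ("rec4",  PySem.Dict.mk [("DL", "Labs - for treatment monitoring: LDL (cost 2)"), ("category", "Labs"), ("main", "LDL"), ("cost", "(cost 2)")]),
  ("rec5",  PySem.Dict.mk [("DL", "Imaging - for risk stratification: carotid doppler (cost 20)"), ("category", "Imaging"), ("main", "carotid doppler"), ("cost", "(cost 20)")]),
  ("rec6",  PySem.Dict.mk [("DL", "Treatment - initiate first-line: low dose statin (yearly cost 200)"), ("category", "Treatment"), ("main", "low dose statin"), ("cost", "(yearly cost 200)")]),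
  ("rec7",  PySem.Dict.mk [("DL", "Treatment - initiate advanced treatment: high dose statin (yearly cost 200)"), ("category", "Treatment"), ("main", "high dose statin"), ("cost", "(yearly cost 200)")]),
  ("rec8",  PySem.Dict.mk [("DL", "Treatment - prescribe advanced treatment: PCSK9 (yearly cost 20,000)"), ("category", "Treatment"), ("main", "PCSK9"), ("cost", "(yearly cost 20,000)")]),
  ("rec9",  PySem.Dict.mk [("DL", "Treatment - upgrade: high dose statin (yearly cost 200)"), ("category", "Treatment"), ("main", "high dose statin"), ("cost", "(yearly cost 200)")]),
  ("rec10", PySem.Dict.mk [("DL", "Treatment - replacement d/t contraindication: switch to PCSK9 (yearly cost 20,000)"), ("category", "Treatment"), ("main", "PCSK9"), ("cost", "(yearly cost 20,000)")]),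
  ("rec11", PySem.Dict.mk [("DL", "Consults - lipidologist consult: d/t statins failure/intolerance, to consider PCSK9 (cost 6)"), ("category", "Consults"), ("main", "lipidologist"), ("cost", "(cost 6)")]),
  ("rec12", PySem.Dict.mk [("DL", "Consults - hepatology consult: d/t high liver enzymes after statin initiation (cost 5)"), ("category", "Consults"), ("main", "hepatology"), ("cost", "(cost 5)")]),
  ("rec13", PySem.Dict.mk [("DL", "Lifestyle - dietitian: package of nutritional consultation sessions (cost 20)"), ("category", "Lifestyle"), ("main", "nutritional consultation"), ("cost", "(cost 20)")]),
  ("rec14", PySem.Dict.mk [("DL", "Treatment - discuss pros/cons of drugs vs. lifestyle changes in gray-zone patients (cost 2)"), ("category", "Treatment"), ("main", "discuss pros/cons"), ("cost", "(cost 2)")]),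
  ("rec15", PySem.Dict.mk [("DL", "Lifestyle - consult about exercise, nutrition, and smoking (cost 2)"), ("category", "Lifestyle"), ("main", "exercise, nutrition, and smoking"), ("cost", "(cost 2)")]),
  ("rec16", PySem.Dict.mk [("DL", "Lifestyle - reccomend the AHA \"Heart & Stroke Helper\" app to track lipids, meds and lifestyle (cost 0)"), ("category", "Lifestyle"), ("main", "\"Heart & Stroke Helper\" app"), ("cost", "(cost 0)")])]

def pvCategoryOrder : List String := ["Labs", "Imaging", "Treatment", "Consults", "Lifestyle", "Other"]

-- body of A's loop 'for _, meta in _RAW_REC_MAP.items(): ... out.setdefault(...).append(dl)'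
def pvAStep (chosen : PySem.Set String) (out : PySem.Dict String (List String))
    (kv : String × PySem.Dict String String) : PySem.Dict String (List String) :=
  let dl := kv.2.getD "DL" ""
  if chosen.contains dl then
    out.modify (kv.2.getD "category" "") [] (fun l => l ++ [dl])   -- setdefault + append
  else out

def pvAFold (chosen : PySem.Set String) : PySem.Dict String (List String) :=
  (PySem.Dict.items pvRawRecMap).foldl (pvAStep chosen) PySem.Dict.empty

def recs_by_category_for_patient (p : List (String × List String)) : PySem.Dict String (List String) :=
  -- chosen = set(p.get("recommendations") or [])   (get=None and an empty list both become [])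
  let chosen : PySem.Set String := PySem.Set.ofList ((PySem.Dict.mk p).getD "recommendations" [])
  pvAFold chosen

def build_pair_recs_alignment_plan (pX : List (String × List String)) (pY : List (String × List String)) : List String × (List (String × List String)) :=
  let by_x := recs_by_category_for_patient pX
  let by_y := recs_by_category_for_patient pY
  let cats_x : PySem.Set String := PySem.Set.ofList by_x.keys
  let cats_y : PySem.Set String := PySem.Set.ofList by_y.keys
  let common := pvCategoryOrder.filter (fun c => cats_x.contains c && cats_y.contains c)
  let rest := pvCategoryOrder.filter (fun c => !common.contains c && (cats_x.contains c || cats_y.contains c))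
  let category_order := common ++ rest
  let per_cat := category_order.foldl (fun d cat =>
    let xs := by_x.getD cat []
    let ys := by_y.getD cat []
    let commons := xs.filter (fun dl => ys.contains dl)
    let x_only := xs.filter (fun dl => !commons.contains dl)
    let y_only := ys.filter (fun dl => !commons.contains dl)
    d.insert cat (commons ++ x_only ++ y_only)) PySem.Dict.empty
  (category_order, per_cat.items)

-- ===== PORT B =====

structure PvBState where
  commonD : PySem.Dict String (List String)
  xD : PySem.Dict String (List String)
  yD : PySem.Dict String (List String)
  hasX : PySem.Set String
  hasY : PySem.Set String

-- body of B's single loop over _RAW_REC_MAP.values()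
def pvBStep (cx cy : PySem.Set String) (st : PvBState) (m0 : PySem.Dict String String) : PvBState :=
  let dl := m0.getD "DL" ""
  let cat := m0.getD "category" ""
  let in_x := cx.contains dl
  let in_y := cy.contains dl
  let st' :=
    if in_x then
      if in_y then { st with hasX := PySem.Set.add st.hasX cat, commonD := st.commonD.modify cat [] (fun l => l ++ [dl]) }
      else { st with hasX := PySem.Set.add st.hasX cat, xD := st.xD.modify cat [] (fun l => l ++ [dl]) }
    else if in_y then { st with yD := st.yD.modify cat [] (fun l => l ++ [dl]) }
    else st
  if in_y then { st' with hasY := PySem.Set.add st'.hasY cat } else st'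

def pvBFold (cx cy : PySem.Set String) : PvBState :=
  (PySem.Dict.values pvRawRecMap).foldl (pvBStep cx cy)
    ⟨PySem.Dict.empty, PySem.Dict.empty, PySem.Dict.empty, PySem.Set.empty, PySem.Set.empty⟩

def build_pair_recs_alignment_plan_alt (pX : List (String × List String)) (pY : List (String × List String)) : List String × (List (String × List String)) :=
  let chosen_x : PySem.Set String := PySem.Set.ofList ((PySem.Dict.mk pX).getD "recommendations" [])
  let chosen_y : PySem.Set String := PySem.Set.ofList ((PySem.Dict.mk pY).getD "recommendations" [])
  let st := pvBFold chosen_x chosen_y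
  let category_order :=
    pvCategoryOrder.filter (fun c => st.hasX.contains c && st.hasY.contains c) ++
    pvCategoryOrder.filter (fun c => st.hasX.contains c != st.hasY.contains c)
  let per_cat := category_order.foldl (fun d c =>
    d.insert c (st.commonD.getD c [] ++ st.xD.getD c [] ++ st.yD.getD c [])) PySem.Dict.empty
  (category_order, per_cat.items)

-- ===== PRECONDITION & SPEC =====
def Spec_build_pair_recs_alignment_plan (pX : List (String × List String)) (pY : List (String × List String)) (out : List String × (List (String × List String))) : Prop := out = build_pair_recs_alignment_plan_alt pX pY
instance (pX : List (String × List String)) (pY : List (String × List String)) (out : List String × (List (String × List String))) : Decidable (Spec_build_pair_recs_alignment_plan pX pY out) := by unfold Spec_build_pair_recs_alignment_plan; infer_instance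

-- ===== CLAIM (what is proved, stated in full; the proofs are below) =====
def Claim_equal_build_pair_recs_alignment_plan : Prop := ∀ (pX : List (String × List String)) (pY : List (String × List String)), Dom_build_pair_recs_alignment_plan pX pY → Spec_build_pair_recs_alignment_plan pX pY (build_pair_recs_alignment_plan pX pY)

-- ===== LEMMAS AND PROOFS =====

def pvDl (m : PySem.Dict String String) : String := m.getD "DL" ""
def pvCat (m : PySem.Dict String String) : String := m.getD "category" ""

-- A's grouping loop: value at a category
theorem pvA_getD (ch : PySem.Set String) (l : List (String × PySem.Dict String String))
    (d : PySem.Dict String (List String)) (c : String) :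
    (l.foldl (pvAStep ch) d).getD c [] =
      d.getD c [] ++ (l.filter (fun kv => ch.contains (pvDl kv.2) && (pvCat kv.2 == c))).map (fun kv => pvDl kv.2) := by
  induction l generalizing d with
  | nil => simp
  | cons kv t ih =>
    simp only [List.foldl_cons, List.filter_cons]
    rw [ih]
    by_cases hx : kv.2.getD "DL" "" ∈ ch <;> by_cases hc : kv.2.getD "category" "" = c <;>
      simp [pvAStep, pvDl, pvCat, hx, hc, PySem.Dict.getD_modify] <;>
      (try (intro h; subst h; simp_all))

-- A's grouping loop: which categories become keys
theorem pvA_keys_mem (ch : PySem.Set String) (l : List (String × PySem.Dict String String))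
    (d : PySem.Dict String (List String)) (c : String) :
    c ∈ (l.foldl (pvAStep ch) d).keys ↔
      c ∈ d.keys ∨ ∃ kv ∈ l, pvDl kv.2 ∈ ch ∧ pvCat kv.2 = c := by
  induction l generalizing d with
  | nil => simp
  | cons kv t ih =>
    simp only [List.foldl_cons]
    rw [ih]
    by_cases hx : kv.2.getD "DL" "" ∈ ch <;>
      simp [pvAStep, pvDl, pvCat, hx, PySem.Dict.keys_modify, PySem.Dict.mem_keys_insert] <;>
      tauto

-- B's single loop: the five state components
theorem pvB_commonD (cx cy : PySem.Set String) (l : List (PySem.Dict String String)) (st : PvBState) (c : String) :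
    ((l.foldl (pvBStep cx cy) st).commonD).getD c [] =
      st.commonD.getD c [] ++ (l.filter (fun m => cx.contains (pvDl m) && cy.contains (pvDl m) && (pvCat m == c))).map pvDl := by
  induction l generalizing st with
  | nil => simp
  | cons m t ih =>
    simp only [List.foldl_cons, List.filter_cons]
    rw [ih]
    by_cases hx : m.getD "DL" "" ∈ cx <;> by_cases hy : m.getD "DL" "" ∈ cy <;> by_cases hc : m.getD "category" "" = c <;>
      simp [pvBStep, pvDl, pvCat, hx, hy, hc, PySem.Dict.getD_modify] <;>
      (try (intro h; subst h; simp_all))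

theorem pvB_xD (cx cy : PySem.Set String) (l : List (PySem.Dict String String)) (st : PvBState) (c : String) :
    ((l.foldl (pvBStep cx cy) st).xD).getD c [] =
      st.xD.getD c [] ++ (l.filter (fun m => cx.contains (pvDl m) && !cy.contains (pvDl m) && (pvCat m == c))).map pvDl := by
  induction l generalizing st with
  | nil => simp
  | cons m t ih =>
    simp only [List.foldl_cons, List.filter_cons]
    rw [ih]
    by_cases hx : m.getD "DL" "" ∈ cx <;> by_cases hy : m.getD "DL" "" ∈ cy <;> by_cases hc : m.getD "category" "" = c <;>
      simp [pvBStep, pvDl, pvCat, hx, hy, hc, PySem.Dict.getD_modify] <;>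
      (try (intro h; subst h; simp_all))

theorem pvB_yD (cx cy : PySem.Set String) (l : List (PySem.Dict String String)) (st : PvBState) (c : String) :
    ((l.foldl (pvBStep cx cy) st).yD).getD c [] =
      st.yD.getD c [] ++ (l.filter (fun m => !cx.contains (pvDl m) && cy.contains (pvDl m) && (pvCat m == c))).map pvDl := by
  induction l generalizing st with
  | nil => simp
  | cons m t ih =>
    simp only [List.foldl_cons, List.filter_cons]
    rw [ih]
    by_cases hx : m.getD "DL" "" ∈ cx <;> by_cases hy : m.getD "DL" "" ∈ cy <;> by_cases hc : m.getD "category" "" = c <;>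
      simp [pvBStep, pvDl, pvCat, hx, hy, hc, PySem.Dict.getD_modify] <;>
      (try (intro h; subst h; simp_all))

theorem pvB_hasX (cx cy : PySem.Set String) (l : List (PySem.Dict String String)) (st : PvBState) (c : String) :
    c ∈ (l.foldl (pvBStep cx cy) st).hasX ↔
      c ∈ st.hasX ∨ ∃ m ∈ l, pvDl m ∈ cx ∧ pvCat m = c := by
  induction l generalizing st with
  | nil => simp
  | cons m t ih =>
    simp only [List.foldl_cons]
    rw [ih]
    by_cases hx : m.getD "DL" "" ∈ cx <;> by_cases hy : m.getD "DL" "" ∈ cy <;>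
      simp [pvBStep, pvDl, pvCat, hx, hy, PySem.Set.mem_add] <;> tauto

theorem pvB_hasY (cx cy : PySem.Set String) (l : List (PySem.Dict String String)) (st : PvBState) (c : String) :
    c ∈ (l.foldl (pvBStep cx cy) st).hasY ↔
      c ∈ st.hasY ∨ ∃ m ∈ l, pvDl m ∈ cy ∧ pvCat m = c := by
  induction l generalizing st with
  | nil => simp
  | cons m t ih =>
    simp only [List.foldl_cons]
    rw [ih]
    by_cases hx : m.getD "DL" "" ∈ cx <;> by_cases hy : m.getD "DL" "" ∈ cy <;>
      simp [pvBStep, pvDl, pvCat, hx, hy, PySem.Set.mem_add] <;> tauto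

-- membership in a projected filtered list is the predicate itself, when the projection is duplicate-free
theorem pv_contains_map_filter {α : Type} (f : α → String) (l : List α)
    (hnd : (l.map f).Nodup) (p : α → Bool) (a : α) (ha : a ∈ l) :
    ((l.filter p).map f).contains (f a) = p a := by
  rw [Bool.eq_iff_iff]
  simp only [List.contains_iff_mem, List.mem_map, List.mem_filter]
  constructor
  · rintro ⟨b, ⟨hb, hpb⟩, hfb⟩
    have := List.inj_on_of_nodup_map hnd hb ha hfb
    rwa [this] at hpb
  · intro hpa
    exact ⟨a, ⟨ha, hpa⟩, rfl⟩

theorem pv_nodup_dls : ((PySem.Dict.values pvRawRecMap).map pvDl).Nodup := by decide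


theorem pv_hA (ch : PySem.Set String) (c : String) :
    (pvAFold ch).getD c [] =
      ((PySem.Dict.values pvRawRecMap).filter (fun m => ch.contains (pvDl m) && (pvCat m == c))).map pvDl := by
  have hval : PySem.Dict.values pvRawRecMap = (PySem.Dict.items pvRawRecMap).map Prod.snd := rfl
  rw [pvAFold, pvA_getD, hval, List.filter_map, List.map_map]
  rfl

theorem pv_hAkeys (ch : PySem.Set String) (c : String) :
    c ∈ (pvAFold ch).keys ↔ ∃ m ∈ PySem.Dict.values pvRawRecMap, pvDl m ∈ ch ∧ pvCat m = c := by
  have hval : PySem.Dict.values pvRawRecMap = (PySem.Dict.items pvRawRecMap).map Prod.snd := rfl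
  rw [pvAFold, pvA_keys_mem, hval]
  simp [List.mem_map]
  constructor
  · rintro ⟨a, b, hab, h1, h2⟩; exact ⟨b, ⟨a, hab⟩, h1, h2⟩
  · rintro ⟨m, ⟨a, ha⟩, h1, h2⟩; exact ⟨a, m, ha, h1, h2⟩
theorem pv_value_eq (cx cy : PySem.Set String) (c : String) :
    ((pvAFold cx).getD c []).filter (fun dl => ((pvAFold cy).getD c []).contains dl)
      ++ ((pvAFold cx).getD c []).filter (fun dl =>
           !(((pvAFold cx).getD c []).filter (fun dl => ((pvAFold cy).getD c []).contains dl)).contains dl)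
      ++ ((pvAFold cy).getD c []).filter (fun dl =>
           !(((pvAFold cx).getD c []).filter (fun dl => ((pvAFold cy).getD c []).contains dl)).contains dl)
    = (pvBFold cx cy).commonD.getD c [] ++ (pvBFold cx cy).xD.getD c [] ++ (pvBFold cx cy).yD.getD c [] := by
  have hnd := pv_nodup_dls
  set M := PySem.Dict.values pvRawRecMap with hM
  simp only [pv_hA]
  rw [pvBFold, pvB_commonD, pvB_xD, pvB_yD]
  simp only [PySem.Dict.getD_empty]
  rw [← hM]
  have hcmf : ∀ (p : PySem.Dict String String → Bool), ∀ m ∈ M,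
      ((M.filter p).map pvDl).contains (pvDl m) = p m := fun p m hm =>
    pv_contains_map_filter pvDl M hnd p m hm
  have h1 : ((M.filter (fun m => cx.contains (pvDl m) && (pvCat m == c))).map pvDl).filter
        (fun dl => ((M.filter (fun m => cy.contains (pvDl m) && (pvCat m == c))).map pvDl).contains dl)
      = (M.filter (fun m => cx.contains (pvDl m) && cy.contains (pvDl m) && (pvCat m == c))).map pvDl := by
    rw [List.filter_map, List.filter_filter]
    refine congrArg (List.map pvDl) (List.filter_congr ?_)
    intro m hm
    simp only [Function.comp_apply, hcmf (fun m => cy.contains (pvDl m) && (pvCat m == c)) m hm]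
    cases hx : cx.contains (pvDl m) <;> cases hy : cy.contains (pvDl m) <;> cases hc : (pvCat m == c) <;> rfl
  rw [h1]
  have h2 : ((M.filter (fun m => cx.contains (pvDl m) && (pvCat m == c))).map pvDl).filter
        (fun dl => !((M.filter (fun m => cx.contains (pvDl m) && cy.contains (pvDl m) && (pvCat m == c))).map pvDl).contains dl)
      = (M.filter (fun m => cx.contains (pvDl m) && !cy.contains (pvDl m) && (pvCat m == c))).map pvDl := by
    rw [List.filter_map, List.filter_filter]
    refine congrArg (List.map pvDl) (List.filter_congr ?_)
    intro m hm
    simp only [Function.comp_apply, hcmf (fun m => cx.contains (pvDl m) && cy.contains (pvDl m) && (pvCat m == c)) m hm]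
    cases hx : cx.contains (pvDl m) <;> cases hy : cy.contains (pvDl m) <;> cases hc : (pvCat m == c) <;> rfl
  have h3 : ((M.filter (fun m => cy.contains (pvDl m) && (pvCat m == c))).map pvDl).filter
        (fun dl => !((M.filter (fun m => cx.contains (pvDl m) && cy.contains (pvDl m) && (pvCat m == c))).map pvDl).contains dl)
      = (M.filter (fun m => !cx.contains (pvDl m) && cy.contains (pvDl m) && (pvCat m == c))).map pvDl := by
    rw [List.filter_map, List.filter_filter]
    refine congrArg (List.map pvDl) (List.filter_congr ?_)
    intro m hm
    simp only [Function.comp_apply, hcmf (fun m => cx.contains (pvDl m) && cy.contains (pvDl m) && (pvCat m == c)) m hm]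
    cases hx : cx.contains (pvDl m) <;> cases hy : cy.contains (pvDl m) <;> cases hc : (pvCat m == c) <;> rfl
  rw [h2, h3]
  simp

theorem pv_hsetX (cx cy : PySem.Set String) (c : String) :
    (PySem.Set.ofList (pvAFold cx).keys).contains c = (pvBFold cx cy).hasX.contains c := by
  rw [Bool.eq_iff_iff]
  simp only [PySem.Set.contains_iff, PySem.Set.mem_ofList]
  rw [pv_hAkeys, pvBFold, pvB_hasX]
  simp [PySem.Set.empty]

theorem pv_hsetY (cx cy : PySem.Set String) (c : String) :
    (PySem.Set.ofList (pvAFold cy).keys).contains c = (pvBFold cx cy).hasY.contains c := by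
  rw [Bool.eq_iff_iff]
  simp only [PySem.Set.contains_iff, PySem.Set.mem_ofList]
  rw [pv_hAkeys, pvBFold, pvB_hasY]
  simp [PySem.Set.empty]

theorem build_pair_recs_alignment_plan_spec' (pX pY : List (String × List String)) :
    build_pair_recs_alignment_plan pX pY = build_pair_recs_alignment_plan_alt pX pY := by
  simp only [build_pair_recs_alignment_plan, build_pair_recs_alignment_plan_alt,
    recs_by_category_for_patient]
  generalize PySem.Set.ofList ((PySem.Dict.mk pX).getD "recommendations" []) = cx
  generalize PySem.Set.ofList ((PySem.Dict.mk pY).getD "recommendations" []) = cy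
  have hx := pv_hsetX cx cy
  have hy := pv_hsetY cx cy
  have hcommon : pvCategoryOrder.filter (fun c =>
        (PySem.Set.ofList (pvAFold cx).keys).contains c && (PySem.Set.ofList (pvAFold cy).keys).contains c)
      = pvCategoryOrder.filter (fun c => (pvBFold cx cy).hasX.contains c && (pvBFold cx cy).hasY.contains c) :=
    List.filter_congr (fun c _ => by rw [hx c, hy c])
  rw [hcommon]
  have hrest : pvCategoryOrder.filter (fun c =>
        !(pvCategoryOrder.filter (fun c => (pvBFold cx cy).hasX.contains c && (pvBFold cx cy).hasY.contains c)).contains c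
          && ((PySem.Set.ofList (pvAFold cx).keys).contains c || (PySem.Set.ofList (pvAFold cy).keys).contains c))
      = pvCategoryOrder.filter (fun c => (pvBFold cx cy).hasX.contains c != (pvBFold cx cy).hasY.contains c) := by
    refine List.filter_congr ?_
    intro c hc
    rw [hx c, hy c]
    have hcc : (pvCategoryOrder.filter (fun c => (pvBFold cx cy).hasX.contains c && (pvBFold cx cy).hasY.contains c)).contains c
        = ((pvBFold cx cy).hasX.contains c && (pvBFold cx cy).hasY.contains c) := by
      rw [Bool.eq_iff_iff, List.contains_iff_mem, List.mem_filter]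
      simp [hc]
    rw [hcc]
    cases (pvBFold cx cy).hasX.contains c <;> cases (pvBFold cx cy).hasY.contains c <;> rfl
  rw [hrest]
  congr 1
  refine congrArg PySem.Dict.items ?_
  refine PySem.List.foldl_congr_mem _ _ _ _ ?_
  intro acc cat _
  exact congrArg (acc.insert cat) (pv_value_eq cx cy cat)

-- ===== VERDICT (by name: the statement is the Claim_ definition above) =====
theorem build_pair_recs_alignment_plan_spec : Claim_equal_build_pair_recs_alignment_plan := by
  intro pX pY _
  exact build_pair_recs_alignment_plan_spec' pX pY
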